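-- pv_equiv track=rewrite | github.com/PierreVieira/URI | Python/Strings/1632 - Variações.py | numero_variacoes
-- ===== SOURCE A (Python) =====
-- def resultado(lista_possibilidades):
--     result = 1
--     for c in lista_possibilidades:
--         result *= c
--     return result
--
-- def numero_variacoes(string):
--     lista_possibilidades = []
--     for char in string:
--         if char.upper() in 'AEIOS':
--             lista_possibilidades.append(3)
--         else:
--             lista_possibilidades.append(2)
--     return resultado(lista_possibilidades)
-- ===== SOURCE B (Python) =====
-- def numero_variacoes(string):
--     a = sum(1 for c in string if c.upper() in 'AEIOS')
--     return 3 ** a * 2 ** (len(string) - a)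
-- ===== Notes on version B (the rewrite author's own statement) =====
-- stated objective: simpler
-- what changed: Replaces the build-a-list-of-factors loop plus running-product helper with a single tally of vowel/S characters and a closed-form 3**a * 2**(n-a).
import Mathlib
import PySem

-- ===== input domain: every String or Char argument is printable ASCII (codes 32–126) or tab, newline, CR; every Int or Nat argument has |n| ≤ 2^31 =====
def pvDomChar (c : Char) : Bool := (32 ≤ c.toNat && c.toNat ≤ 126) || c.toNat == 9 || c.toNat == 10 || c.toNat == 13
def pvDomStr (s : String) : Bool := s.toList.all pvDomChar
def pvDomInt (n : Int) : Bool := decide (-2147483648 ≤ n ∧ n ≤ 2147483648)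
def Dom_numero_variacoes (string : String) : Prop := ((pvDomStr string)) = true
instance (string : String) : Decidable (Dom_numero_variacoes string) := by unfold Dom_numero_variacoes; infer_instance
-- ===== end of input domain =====

-- B replaces A's factor-list construction and running-product helper by a tally of
-- vowel/S characters and the closed form 3^a * 2^(n-a); objective: simpler.

-- char.upper() in 'AEIOS' — Char.toUpper is exact for ASCII characters (the stated domain)
def pvIsTriple (c : Char) : Bool := ['A','E','I','O','S'].contains c.toUpper

-- ===== PORT A =====
def resultado (lista_possibilidades : List Int) : Int :=
  lista_possibilidades.foldl (fun result c => result * c) 1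

def numero_variacoes (string : String) : Int :=
  let lista_possibilidades :=
    string.toList.foldl
      (fun lista ch => lista ++ [if pvIsTriple ch then (3 : Int) else 2]) []
  resultado lista_possibilidades

-- ===== PORT B =====
def numero_variacoes_alt (string : String) : Int :=
  let a := (string.toList.filter pvIsTriple).length
  3 ^ a * 2 ^ (string.toList.length - a)

-- ===== PRECONDITION & SPEC =====
def Spec_numero_variacoes (string : String) (out : Int) : Prop := out = numero_variacoes_alt string
instance (string : String) (out : Int) : Decidable (Spec_numero_variacoes string out) := by unfold Spec_numero_variacoes; infer_instance

-- ===== CLAIM (what is proved, stated in full; the proofs are below) =====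
def Claim_equal_numero_variacoes : Prop := ∀ (string : String), Dom_numero_variacoes string → Spec_numero_variacoes string (numero_variacoes string)

-- ===== LEMMAS AND PROOFS =====

-- A's append-accumulator loop builds exactly the mapped list
theorem pv_build_map (l : List Char) (acc : List Int) :
    l.foldl (fun lista ch => lista ++ [if pvIsTriple ch then (3 : Int) else 2]) acc
      = acc ++ l.map (fun ch => if pvIsTriple ch then (3 : Int) else 2) := by
  induction l generalizing acc with
  | nil => simp
  | cons c t ih => simp [List.foldl, ih]

-- the product of the per-character factors equals the closed form
theorem pv_prod_closed (l : List Char) (init : Int) :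
    (l.map (fun ch => if pvIsTriple ch then (3 : Int) else 2)).foldl (fun r c => r * c) init
      = init * (3 ^ (l.filter pvIsTriple).length * 2 ^ (l.length - (l.filter pvIsTriple).length)) := by
  induction l generalizing init with
  | nil => simp
  | cons c t ih =>
    have hle : (t.filter pvIsTriple).length ≤ t.length := List.length_filter_le _ _
    by_cases h : pvIsTriple c
    · simp [h, ih, pow_succ]
      ring
    · simp [h, ih]
      rw [Nat.succ_sub hle, pow_succ]
      ring

theorem numero_variacoes_eq (s : String) : numero_variacoes s = numero_variacoes_alt s := by
  unfold numero_variacoes numero_variacoes_alt resultado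
  rw [pv_build_map, List.nil_append, pv_prod_closed, one_mul]

-- ===== VERDICT (by name: the statement is the Claim_ definition above) =====
theorem numero_variacoes_spec : Claim_equal_numero_variacoes := by
  intro s _
  exact numero_variacoes_eq s
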